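-- pv_equiv track=rewrite | github.com/Mrityunjay87/legendary-octo-lamp | Chotu_Solved.py | n_tuple_sum
-- ===== SOURCE A (Python) =====
-- from itertools import permutations
--
-- def n_tuple_sum(num,l):
--     permutations(num,4)
--     temp=list(permutations(num,4))
--     temp2=[]
--     for i in range(0,len(temp)):
--         if sum(temp[i])==l:
--             temp2.append(temp[i])
--     return temp2
-- ===== SOURCE B (Python) =====
-- def n_tuple_sum(num, l):
--     # O(n^3 + output): enumerate the first three indices; the fourth value is
--     # forced, so look up its positions in a value -> sorted-positions dict.
--     n = len(num)
--     pos = {}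
--     for idx in range(n):
--         v = num[idx]
--         pos[v] = pos.get(v, []) + [idx]
--     out = []
--     for i in range(n):
--         for j in range(n):
--             if j != i:
--                 for k in range(n):
--                     if k != i and k != j:
--                         t = l - num[i] - num[j] - num[k]
--                         for m in pos.get(t, []):
--                             if m != i and m != j and m != k:
--                                 out.append((num[i], num[j], num[k], t))
--     return out
-- ===== Notes on version B (the rewrite author's own statement) =====
-- stated objective: faster
-- what changed: A materialises all O(n^4) 4-permutations and scans them; B loops over the first three indices only and finds every valid fourth index through a value->sorted-positions dictionary built in one pass, emitting the same tuples in the same order.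
import Mathlib
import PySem

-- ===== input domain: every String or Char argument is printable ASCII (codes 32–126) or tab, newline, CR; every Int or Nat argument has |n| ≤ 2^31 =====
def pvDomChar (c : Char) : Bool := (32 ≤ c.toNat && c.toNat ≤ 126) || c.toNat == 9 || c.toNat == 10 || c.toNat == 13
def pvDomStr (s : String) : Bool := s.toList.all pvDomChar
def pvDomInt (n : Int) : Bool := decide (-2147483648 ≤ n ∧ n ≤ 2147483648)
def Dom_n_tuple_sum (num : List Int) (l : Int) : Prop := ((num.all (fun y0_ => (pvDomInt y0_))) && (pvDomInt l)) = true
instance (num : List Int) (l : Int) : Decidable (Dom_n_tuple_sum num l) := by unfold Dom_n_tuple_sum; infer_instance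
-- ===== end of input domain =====

-- B replaces A's scan of all O(n^4) 4-permutations by three index loops plus a
-- value -> positions dictionary for the forced fourth element (O(n^3 + output)).

-- ===== PORT A =====
-- itertools.permutations(num, 4) is PySem.List.permutations num 4 (CPython's exact order).
def n_tuple_sum (num : List Int) (l : Int) : List (List Int) :=
  let _ := PySem.List.permutations num 4          -- first, discarded call
  let temp := PySem.List.permutations num 4
  (PySem.List.pyRange 0 (temp.length : Int) 1).foldl
    (fun temp2 i =>
      if (PySem.List.pyGetD temp i []).sum == l then
        temp2 ++ [PySem.List.pyGetD temp i []]
      else temp2) []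

-- ===== PORT B =====
-- pos[v] = pos.get(v, []) + [idx] over idx in range(len(num))
def pvPosDict (num : List Int) : PySem.Dict Int (List Nat) :=
  (List.range num.length).foldl
    (fun pos idx => pos.modify (num.getD idx 0) [] (· ++ [idx])) PySem.Dict.empty

def n_tuple_sum_alt (num : List Int) (l : Int) : List (List Int) :=
  let n := num.length
  let pos := pvPosDict num
  (List.range n).foldl (fun out i =>
    (List.range n).foldl (fun out j =>
      if j ≠ i then
        (List.range n).foldl (fun out k =>
          if k ≠ i ∧ k ≠ j then
            let t := l - num.getD i 0 - num.getD j 0 - num.getD k 0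
            (pos.getD t []).foldl (fun out m =>
              if m ≠ i ∧ m ≠ j ∧ m ≠ k then
                out ++ [[num.getD i 0, num.getD j 0, num.getD k 0, t]]
              else out) out
          else out) out
      else out) out) []

-- ===== PRECONDITION & SPEC =====
def Spec_n_tuple_sum (num : List Int) (l : Int) (out : List (List Int)) : Prop := out = n_tuple_sum_alt num l
instance (num : List Int) (l : Int) (out : List (List Int)) : Decidable (Spec_n_tuple_sum num l out) := by unfold Spec_n_tuple_sum; infer_instance

-- ===== CLAIM (what is proved, stated in full; the proofs are below) =====
def Claim_equal_n_tuple_sum : Prop := ∀ (num : List Int) (l : Int), Dom_n_tuple_sum num l → Spec_n_tuple_sum num l (n_tuple_sum num l)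

-- ===== LEMMAS AND PROOFS =====

-- one unfolding step of PySem.List.permutations
theorem permStep {α : Type} (xs : List α) (r : Nat) :
    PySem.List.permutations xs (r + 1) =
      (List.range xs.length).flatMap (fun i =>
        (xs[i]?).elim [] (fun x => (PySem.List.permutations (xs.eraseIdx i) r).map (fun p => x :: p))) := by
  rw [PySem.List.permutations]
  apply List.flatMap_congr; intro i hi
  cases xs[i]? <;> simp

-- position-indexed flatMap over a duplicate-free list = element-indexed flatMap with erase
theorem posFlat {α β : Type} [DecidableEq α] (js : List α) (hn : js.Nodup)
    (F : α → List α → List β) :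
    (List.range js.length).flatMap (fun p =>
        (js[p]?).elim [] (fun x => F x (js.eraseIdx p))) =
      js.flatMap (fun x => F x (js.erase x)) := by
  induction js generalizing F with
  | nil => simp
  | cons a t ih =>
    have hat : a ∉ t := (List.nodup_cons.mp hn).1
    have hnt : t.Nodup := (List.nodup_cons.mp hn).2
    rw [List.length_cons, List.range_succ_eq_map, List.flatMap_cons, List.flatMap_map]
    simp only [List.getElem?_cons_succ, List.eraseIdx_cons_succ, List.getElem?_cons_zero,
      List.eraseIdx_cons_zero]
    rw [ih hnt (fun x l => F x (a :: l))]
    rw [List.flatMap_cons, List.erase_cons_head]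
    congr 1
    apply List.flatMap_congr
    intro x hx
    rw [List.erase_cons_tail]
    intro h
    exact hat (by simpa using (beq_iff_eq.mp h) ▸ hx)

theorem permSucc {α : Type} [DecidableEq α] (js : List α) (hn : js.Nodup) (r : Nat) :
    PySem.List.permutations js (r + 1) =
      js.flatMap (fun x => (PySem.List.permutations (js.erase x) r).map (fun p => x :: p)) := by
  rw [permStep]
  exact posFlat js hn (fun x l => (PySem.List.permutations l r).map (fun p => x :: p))

theorem perm0 {α : Type} (js : List α) : PySem.List.permutations js 0 = [[]] := rfl

theorem perm4 (js : List Nat) (hn : js.Nodup) :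
    PySem.List.permutations js 4 =
      js.flatMap (fun i => (js.erase i).flatMap (fun j => ((js.erase i).erase j).flatMap (fun k =>
        (((js.erase i).erase j).erase k).map (fun m => [i, j, k, m])))) := by
  rw [permSucc js hn 3]
  apply List.flatMap_congr; intro i hi
  rw [permSucc _ (hn.erase i) 2, List.map_flatMap]
  apply List.flatMap_congr; intro j hj
  rw [permSucc _ ((hn.erase i).erase j) 1, List.map_flatMap, List.map_flatMap]
  apply List.flatMap_congr; intro k hk
  rw [permSucc _ (((hn.erase i).erase j).erase k) 0]
  simp only [perm0, List.map_flatMap, List.map_cons, List.map_nil]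
  rw [List.map_eq_flatMap]

theorem mapPerm {α β : Type} (f : α → β) (r : Nat) : ∀ (js : List α),
    PySem.List.permutations (js.map f) r = (PySem.List.permutations js r).map (List.map f) := by
  induction r with
  | zero => intro js; simp only [perm0, List.map_cons, List.map_nil]
  | succ r ih =>
    intro js
    rw [permStep, permStep, List.map_flatMap, List.length_map]
    apply List.flatMap_congr; intro i hi
    rw [List.getElem?_map, List.eraseIdx_map, ih]
    cases js[i]? <;> simp [List.map_map, Function.comp]

theorem A_filter (num : List Int) (l : Int) :
    n_tuple_sum num l = (PySem.List.permutations num 4).filter (fun t => t.sum == l) := by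
  unfold n_tuple_sum
  rw [PySem.List.foldl_pyRange_zero_pyGetD' (PySem.List.permutations num 4) []
    (fun acc t => if t.sum == l then acc ++ [t] else acc) []]
  rw [PySem.List.foldl_append_if_eq_filter]
  simp

theorem rangeMap (num : List Int) :
    (List.range num.length).map (fun i => num.getD i 0) = num := by
  apply List.ext_getElem
  · simp
  · intro i h1 h2
    simp [List.getD_eq_getElem?_getD, List.getElem?_eq_getElem h2]

theorem posD (num : List Int) (t : Int) :
    (pvPosDict num).getD t [] = (List.range num.length).filter (fun m => num.getD m 0 == t) := by
  unfold pvPosDict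
  rw [← List.foldl_map (f := fun idx => (num.getD idx 0, idx))
    (g := fun (d : PySem.Dict Int (List Nat)) (p : Int × Nat) => d.modify p.1 [] (fun v => v ++ [p.2]))]
  rw [PySem.Dict.getD_foldl_modify_append]
  simp [List.filter_map, List.map_map, Function.comp_def]

theorem foldl_guard_append {α β : Type} (l : List α) (P : α → Prop) [DecidablePred P]
    (G : α → List β) (acc : List β) :
    l.foldl (fun out x => if P x then out ++ G x else out) acc =
      acc ++ l.flatMap (fun x => if P x then G x else []) := by
  have h1 : l.foldl (fun out x => if P x then out ++ G x else out) acc =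
      l.foldl (fun out x => out ++ if P x then G x else []) acc :=
    PySem.List.foldl_congr_mem _ _ _ _ (by intro a x hx; split <;> simp)
  rw [h1]
  exact PySem.List.foldl_append_eq_flatMap _ _ _

theorem flatMap_filter {α β : Type} (p : α → Bool) (F : α → List β) (l : List α) :
    (l.filter p).flatMap F = l.flatMap (fun x => if p x then F x else []) := by
  induction l with
  | nil => simp
  | cons a t ih => rw [List.filter_cons]; split <;> simp_all

theorem eraseFilter1 (n : Nat) (a : Nat) :
    (List.range n).erase a = (List.range n).filter (fun x => x != a) :=
  (List.nodup_range).erase_eq_filter a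

theorem eraseFilter2 (n : Nat) (a b : Nat) :
    ((List.range n).filter (fun x => x != a)).erase b =
      (List.range n).filter (fun x => x != b && x != a) := by
  rw [(List.nodup_range.filter _).erase_eq_filter b, List.filter_filter]

theorem eraseFilter3 (n : Nat) (a b c : Nat) :
    ((List.range n).filter (fun x => x != b && x != a)).erase c =
      (List.range n).filter (fun x => x != c && (x != b && x != a)) := by
  rw [(List.nodup_range.filter _).erase_eq_filter c, List.filter_filter]

theorem main_eq (num : List Int) (l : Int) : n_tuple_sum num l = n_tuple_sum_alt num l := by
  rw [A_filter]
  have hperm : PySem.List.permutations num 4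
      = (PySem.List.permutations (List.range num.length) 4).map (List.map (fun i => num.getD i 0)) := by
    conv_lhs => rw [← rangeMap num]
    rw [mapPerm]
  rw [hperm, perm4 _ List.nodup_range]
  simp only [eraseFilter1, eraseFilter2, eraseFilter3]
  simp only [List.map_flatMap, List.filter_flatMap, List.map_map, Function.comp_def,
    List.filter_map, List.map_cons, List.map_nil]
  simp only [List.map_eq_flatMap, flatMap_filter]
  conv_rhs => unfold n_tuple_sum_alt
  simp only [posD]
  simp only [PySem.List.foldl_append_ite, foldl_guard_append,
    PySem.List.foldl_append_eq_flatMap, List.nil_append]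
  apply List.flatMap_congr; intro i _
  apply List.flatMap_congr; intro j _
  by_cases hji : j = i
  · simp [hji]
  rw [if_pos (show (j != i) = true by simp [hji]), if_pos hji]
  apply List.flatMap_congr; intro k _
  by_cases hki : k = i
  · simp [hki]
  by_cases hkj : k = j
  · simp [hkj]
  have hL : (k != j && k != i) = true := by simp [hki, hkj]
  rw [if_pos hL, if_pos ⟨hki, hkj⟩]
  rw [List.filter_filter, List.map_eq_flatMap, flatMap_filter]
  apply List.flatMap_congr; intro m _
  simp only [List.sum_cons, List.sum_nil, beq_iff_eq, Bool.and_eq_true, bne_iff_ne, ne_eq,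
    decide_eq_true_eq]
  split_ifs <;> simp_all <;> omega

theorem n_tuple_sum_spec : Claim_equal_n_tuple_sum := by
  intro num l _
  unfold Spec_n_tuple_sum
  exact main_eq num l
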